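-- pv_equiv track=rewrite | github.com/Blixthalka/aoc2021 | python/day12/day12.py | contains_double_small
-- ===== SOURCE A (Python) =====
-- from collections import defaultdict
--
-- def is_small(node):
--     return node.lower() == node
--
-- def contains_double_small(path):
--     dict = defaultdict(int)
--     for key in list(filter(is_small, path)):
--         dict[key] += 1
--     for v in dict.values():
--         if v > 1:
--             return True
--     return False
-- ===== SOURCE B (Python) =====
-- def is_small(node):
--     return node.lower() == node
--
-- def contains_double_small(path):
--     seen = set()
--     for node in path:
--         if is_small(node):
--             if node in seen:
--                 return True
--             seen.add(node)
--     return False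
-- ===== Notes on version B (the rewrite author's own statement) =====
-- stated objective: simpler
-- what changed: Replaces the two-pass count-dict-then-scan-values with a single early-exiting pass that maintains a set of small nodes already seen and returns True at the first repeat.
import Mathlib
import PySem

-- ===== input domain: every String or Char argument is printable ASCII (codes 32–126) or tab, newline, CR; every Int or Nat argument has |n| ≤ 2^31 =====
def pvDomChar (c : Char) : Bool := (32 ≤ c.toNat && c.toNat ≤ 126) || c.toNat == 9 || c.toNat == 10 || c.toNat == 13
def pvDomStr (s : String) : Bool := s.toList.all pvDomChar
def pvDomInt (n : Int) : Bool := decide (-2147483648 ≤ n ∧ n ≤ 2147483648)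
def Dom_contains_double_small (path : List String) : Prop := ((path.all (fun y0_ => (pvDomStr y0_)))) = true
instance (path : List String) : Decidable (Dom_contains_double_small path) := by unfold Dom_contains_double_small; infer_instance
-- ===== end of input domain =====

-- B collapses A's two passes (count occurrences into a dict, then scan the values) into one early-exiting pass over path with a seen-set. Objective: simpler.

-- helper shared by both Pythons: is_small(node) = node.lower() == node
def pv_is_small (node : String) : Bool := PySem.Str.lower node == node

-- ===== PORT A =====
def contains_double_small (path : List String) : Bool :=
  let dict : PySem.Dict String Int :=
    (path.filter pv_is_small).foldl (fun d key => d.modify key 0 (· + 1)) PySem.Dict.empty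
  dict.values.any (fun v => v > 1)

-- ===== PORT B =====
def pv_scan (seen : PySem.Set String) : List String → Bool
  | [] => false
  | node :: rest =>
    if pv_is_small node then
      if PySem.Set.contains seen node then true
      else pv_scan (PySem.Set.add seen node) rest
    else pv_scan seen rest

def contains_double_small_alt (path : List String) : Bool :=
  pv_scan PySem.Set.empty path

-- ===== PRECONDITION & SPEC =====
def Spec_contains_double_small (path : List String) (out : Bool) : Prop := out = contains_double_small_alt path
instance (path : List String) (out : Bool) : Decidable (Spec_contains_double_small path out) := by unfold Spec_contains_double_small; infer_instance

-- ===== CLAIM (what is proved, stated in full; the proofs are below) =====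
def Claim_equal_contains_double_small : Prop := ∀ (path : List String), Dom_contains_double_small path → Spec_contains_double_small path (contains_double_small path)

-- ===== LEMMAS AND PROOFS =====

-- A returns true iff some small node occurs at least twice, i.e. the filtered list is not Nodup.
theorem contains_double_small_eq_true_iff (path : List String) :
    contains_double_small path = true ↔ ¬ (path.filter pv_is_small).Nodup := by
  unfold contains_double_small
  rw [← PySem.Dict.counter_eq_foldl]
  simp only [PySem.Dict.values, PySem.Dict.items_counter, List.map_map, List.any_eq_true,
    List.mem_map, PySem.Set.mem_ofList, List.nodup_iff_count_le_one]
  constructor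
  · rintro ⟨v, ⟨k, hk, rfl⟩, hv⟩ h
    have := h k
    simp only [Function.comp_apply, decide_eq_true_iff] at hv
    omega
  · intro h
    push Not at h
    obtain ⟨k, hk⟩ := h
    refine ⟨((path.filter pv_is_small).count k : Int), ⟨k, ?_, rfl⟩, ?_⟩
    · exact List.count_pos_iff.mp (by omega)
    · simp only [decide_eq_true_iff]
      exact_mod_cast by omega

-- B's scan invariant: with a Nodup seen-set, the scan reports a duplicate of seen ++ filtered rest.
theorem pv_scan_eq_true_iff (l : List String) (seen : PySem.Set String) (hs : seen.Nodup) :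
    pv_scan seen l = true ↔ ¬ (seen ++ l.filter pv_is_small).Nodup := by
  induction l generalizing seen with
  | nil => simp [pv_scan, hs]
  | cons node rest ih =>
    by_cases hsm : pv_is_small node
    · simp only [pv_scan, hsm, if_true, List.filter_cons_of_pos hsm]
      by_cases hmem : node ∈ seen
      · have : PySem.Set.contains seen node = true := by
          simpa [PySem.Set.contains] using hmem
        rw [this]
        simp only [if_true, true_iff]
        intro hnd
        rcases List.nodup_append.mp hnd with ⟨_, _, hdisj⟩
        exact hdisj node hmem node (by simp) rfl
      · have hc : PySem.Set.contains seen node = false := by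
          simpa [PySem.Set.contains] using hmem
        rw [hc]
        simp only [Bool.false_eq_true, if_false]
        have hadd : PySem.Set.add seen node = seen ++ [node] := by
          simp [PySem.Set.add, PySem.Set.contains, hmem]
        have hnd' : (PySem.Set.add seen node).Nodup := by
          rw [hadd]
          exact List.Nodup.append hs (List.nodup_singleton node)
            (by simpa using fun h => absurd h hmem)
        rw [ih _ hnd', hadd, List.append_assoc]
        simp
    · simp only [pv_scan, hsm, List.filter_cons_of_neg hsm]
      exact ih seen hs

-- ===== VERDICT (by name: the statement is the Claim_ definition above) =====
theorem contains_double_small_spec : Claim_equal_contains_double_small := by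
  intro path _
  unfold Spec_contains_double_small contains_double_small_alt
  have hA := contains_double_small_eq_true_iff path
  have hB := pv_scan_eq_true_iff path PySem.Set.empty (by simp [PySem.Set.empty])
  simp only [PySem.Set.empty, List.nil_append] at hB
  rw [← hB] at hA
  exact Bool.coe_iff_coe.mp hA
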